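-- pv_equiv track=rewrite | github.com/teebuphilip/fo_test_harness | feature_adder.py | match_intake_feature
-- ===== SOURCE A (Python) =====
-- from typing import Optional
--
-- def match_intake_feature(feature_str: str, intake_features: list) -> Optional[str]:
--     """
--     Try to match feature_str against the intake feature list.
--     Returns the matched intake feature string, or None if no match.
--     """
--     fl = feature_str.lower()
--     # Exact match first
--     for f in intake_features:
--         if f.lower() == fl:
--             return f
--     # Substring match
--     for f in intake_features:
--         if fl in f.lower() or f.lower() in fl:
--             return f
--     # Word overlap match (>=50% of words in common)
--     query_words = set(fl.split())
--     for f in intake_features: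
--         candidate_words = set(f.lower().split())
--         overlap = len(query_words & candidate_words)
--         if overlap >= max(1, len(query_words) // 2):
--             return f
--     return None
-- ===== SOURCE B (Python) =====
-- def match_intake_feature(feature_str: str, intake_features: list):
--     """Single pass: classify each feature into a tier (1 exact, 2 substring,
--     3 word-overlap) and keep the earliest feature of the best tier."""
--     fl = feature_str.lower()
--     query_words = set(fl.split())
--     need = max(1, len(query_words) // 2)
--     best_tier = 4
--     best = None
--     for f in intake_features:
--         low = f.lower()
--         if low == fl:
--             tier = 1
--         elif fl in low or low in fl:
--             tier = 2
--         elif len(query_words & set(low.split())) >= need: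
--             tier = 3
--         else:
--             continue
--         if tier < best_tier:
--             if tier == 1:
--                 return f
--             best_tier = tier
--             best = f
--     return best
-- ===== Notes on version B (the rewrite author's own statement) =====
-- stated objective: alternative
-- what changed: Replaces A's three sequential scans (exact, then substring, then word-overlap) by a single pass that assigns each feature a tier and keeps the earliest feature of the strictly best tier, computing each feature's lowercase form once.
import Mathlib
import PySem

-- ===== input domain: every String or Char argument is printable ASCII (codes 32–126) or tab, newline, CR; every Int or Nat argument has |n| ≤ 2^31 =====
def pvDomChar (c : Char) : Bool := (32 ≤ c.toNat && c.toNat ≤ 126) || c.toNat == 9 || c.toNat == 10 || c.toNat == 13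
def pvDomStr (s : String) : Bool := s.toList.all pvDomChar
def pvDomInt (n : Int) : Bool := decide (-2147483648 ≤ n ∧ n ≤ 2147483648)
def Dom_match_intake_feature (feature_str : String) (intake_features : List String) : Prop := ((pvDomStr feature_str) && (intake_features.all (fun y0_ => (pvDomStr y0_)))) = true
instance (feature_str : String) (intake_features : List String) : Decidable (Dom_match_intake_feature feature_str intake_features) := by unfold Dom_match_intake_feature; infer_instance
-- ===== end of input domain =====

-- B replaces A's three sequential scans by one tiered pass keeping the earliest best-tier feature (alternative decomposition, same results).

-- ===== PORT A =====
-- A's first loop: exact match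
def pvA_exact (fl : String) : List String → Option String
  | [] => none
  | f :: rest => if PySem.Str.lower f == fl then some f else pvA_exact fl rest

-- A's second loop: substring match
def pvA_sub (fl : String) : List String → Option String
  | [] => none
  | f :: rest =>
      if PySem.Str.isIn fl (PySem.Str.lower f) || PySem.Str.isIn (PySem.Str.lower f) fl then some f
      else pvA_sub fl rest

-- A's third loop: word-overlap match
def pvA_overlap (qw : PySem.Set String) : List String → Option String
  | [] => none
  | f :: rest =>
      let cw := PySem.Set.ofList (PySem.Str.split₀ (PySem.Str.lower f))
      if max 1 (PySem.Int.floordiv (PySem.Set.len qw) 2) ≤ PySem.Set.len (PySem.Set.inter qw cw) then some f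
      else pvA_overlap qw rest

def match_intake_feature (feature_str : String) (intake_features : List String) : Option String :=
  let fl := PySem.Str.lower feature_str
  match pvA_exact fl intake_features with
  | some f => some f
  | none =>
    match pvA_sub fl intake_features with
    | some f => some f
    | none =>
      let qw := PySem.Set.ofList (PySem.Str.split₀ fl)
      pvA_overlap qw intake_features

-- ===== PORT B =====
-- tier of a single feature: 1 exact, 2 substring, 3 word overlap, none otherwise
def pvB_tier (fl : String) (qw : PySem.Set String) (need : Int) (f : String) : Option Nat :=
  let low := PySem.Str.lower f
  if low == fl then some 1
  else if PySem.Str.isIn fl low || PySem.Str.isIn low fl then some 2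
  else if need ≤ PySem.Set.len (PySem.Set.inter qw (PySem.Set.ofList (PySem.Str.split₀ low))) then some 3
  else none

-- single pass keeping the earliest feature of the strictly best tier (early return on tier 1)
def pvB_loop (fl : String) (qw : PySem.Set String) (need : Int) : List String → Nat → Option String → Option String
  | [], _, best => best
  | f :: rest, bt, best =>
    match pvB_tier fl qw need f with
    | none => pvB_loop fl qw need rest bt best
    | some t =>
      if t < bt then
        if t == 1 then some f else pvB_loop fl qw need rest t (some f)
      else pvB_loop fl qw need rest bt best

def match_intake_feature_alt (feature_str : String) (intake_features : List String) : Option String :=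
  let fl := PySem.Str.lower feature_str
  let qw := PySem.Set.ofList (PySem.Str.split₀ fl)
  let need := max 1 (PySem.Int.floordiv (PySem.Set.len qw) 2)
  pvB_loop fl qw need intake_features 4 none

-- ===== PRECONDITION & SPEC =====
def Spec_match_intake_feature (feature_str : String) (intake_features : List String) (out : Option String) : Prop := out = match_intake_feature_alt feature_str intake_features
instance (feature_str : String) (intake_features : List String) (out : Option String) : Decidable (Spec_match_intake_feature feature_str intake_features out) := by unfold Spec_match_intake_feature; infer_instance

-- ===== CLAIM (what is proved, stated in full; the proofs are below) =====
def Claim_equal_match_intake_feature : Prop := ∀ (feature_str : String) (intake_features : List String), Dom_match_intake_feature feature_str intake_features → Spec_match_intake_feature feature_str intake_features (match_intake_feature feature_str intake_features)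

-- ===== LEMMAS AND PROOFS =====
-- the three conditions as Bool predicates
def pvC1 (fl f : String) : Bool := PySem.Str.lower f == fl
def pvC2 (fl f : String) : Bool := PySem.Str.isIn fl (PySem.Str.lower f) || PySem.Str.isIn (PySem.Str.lower f) fl
def pvC3 (qw : PySem.Set String) (need : Int) (f : String) : Bool :=
  decide (need ≤ PySem.Set.len (PySem.Set.inter qw (PySem.Set.ofList (PySem.Str.split₀ (PySem.Str.lower f)))))

theorem pvA_exact_eq (fl : String) (xs : List String) : pvA_exact fl xs = xs.find? (pvC1 fl) := by
  induction xs with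
  | nil => rfl
  | cons f rest ih =>
      simp only [pvA_exact, List.find?]
      cases h : pvC1 fl f
      · rw [if_neg (by simpa [pvC1] using h)]; exact ih
      · rw [if_pos (by simpa [pvC1] using h)]

theorem pvA_sub_eq (fl : String) (xs : List String) : pvA_sub fl xs = xs.find? (pvC2 fl) := by
  induction xs with
  | nil => rfl
  | cons f rest ih =>
      simp only [pvA_sub, List.find?]
      cases h : pvC2 fl f
      · rw [if_neg (by simpa [pvC2] using h)]; exact ih
      · rw [if_pos (by simpa [pvC2] using h)]

theorem pvA_overlap_eq (qw : PySem.Set String) (xs : List String) :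
    pvA_overlap qw xs = xs.find? (pvC3 qw (max 1 (PySem.Int.floordiv (PySem.Set.len qw) 2))) := by
  induction xs with
  | nil => rfl
  | cons f rest ih =>
      simp only [pvA_overlap, List.find?]
      cases h : pvC3 qw (max 1 (PySem.Int.floordiv (PySem.Set.len qw) 2)) f
      · rw [if_neg (by simpa [pvC3] using h)]; exact ih
      · rw [if_pos (by simpa [pvC3] using h)]

-- find? with a conjoined negated condition that is false everywhere
theorem pvFind?_and_not (p q : String → Bool) (xs : List String) (h : ∀ x ∈ xs, p x = false) :
    xs.find? (fun x => !p x && q x) = xs.find? q := by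
  induction xs with
  | nil => rfl
  | cons f rest ih =>
      have hf : p f = false := h f (List.mem_cons_self ..)
      simp only [List.find?, hf, Bool.not_false, Bool.true_and]
      cases q f <;> simp [ih (fun x hx => h x (List.mem_cons_of_mem _ hx))]

-- the reference result B's pass must reach from state (bt, best)
def pvRef (fl : String) (qw : PySem.Set String) (need : Int) (xs : List String)
    (bt : Nat) (best : Option String) : Option String :=
  match xs.find? (pvC1 fl) with
  | some f => some f
  | none =>
    if bt = 2 then best
    else
      match xs.find? (fun f => !pvC1 fl f && pvC2 fl f) with
      | some f => some f
      | none =>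
        if bt = 3 then best
        else
          match xs.find? (fun f => !pvC1 fl f && !pvC2 fl f && pvC3 qw need f) with
          | some f => some f
          | none => best

-- main invariant of B's single pass
theorem pvB_loop_eq (fl : String) (qw : PySem.Set String) (need : Int) (xs : List String) :
    ∀ (bt : Nat) (best : Option String), 2 ≤ bt →
    pvB_loop fl qw need xs bt best = pvRef fl qw need xs bt best := by
  induction xs with
  | nil => intro bt best _; simp [pvB_loop, pvRef]
  | cons f rest ih =>
      intro bt best hbt
      have hC1 : (PySem.Str.lower f == fl) = pvC1 fl f := rfl
      have hC2 : (PySem.Str.isIn fl (PySem.Str.lower f) || PySem.Str.isIn (PySem.Str.lower f) fl) = pvC2 fl f := rfl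
      have hC3 : (decide (need ≤ PySem.Set.len (PySem.Set.inter qw (PySem.Set.ofList (PySem.Str.split₀ (PySem.Str.lower f)))))) = pvC3 qw need f := rfl
      cases hc1 : pvC1 fl f with
      | true =>
          have h1lt : 1 < bt := by omega
          simp [pvB_loop, pvB_tier, hC1, hc1, pvRef, h1lt]
      | false =>
        cases hc2 : pvC2 fl f with
        | true =>
            have hL : pvB_loop fl qw need (f :: rest) bt best =
                if 2 < bt then pvB_loop fl qw need rest 2 (some f)
                else pvB_loop fl qw need rest bt best := by
              simp only [pvB_loop, pvB_tier]
              rw [hC1, hc1, if_neg (by simp), hC2, hc2, if_pos rfl]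
              by_cases h : 2 < bt <;> simp [h]
            by_cases hb : 2 < bt
            · rw [hL, if_pos hb, ih 2 (some f) le_rfl]
              simp only [pvRef, List.find?_cons, hc1, hc2, Bool.not_false, Bool.true_and]
              cases List.find? (pvC1 fl) rest <;> simp [Nat.ne_of_gt hb]
            · have hb2 : bt = 2 := by omega
              rw [hL, if_neg hb, ih bt best hbt, hb2]
              simp only [pvRef, List.find?_cons, hc1]
              cases List.find? (pvC1 fl) rest <;> simp
        | false =>
          cases hc3 : pvC3 qw need f with
          | true =>
              have hL : pvB_loop fl qw need (f :: rest) bt best =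
                  if 3 < bt then pvB_loop fl qw need rest 3 (some f)
                  else pvB_loop fl qw need rest bt best := by
                have h3p : need ≤ PySem.Set.len (PySem.Set.inter qw (PySem.Set.ofList (PySem.Str.split₀ (PySem.Str.lower f)))) := by
                  simpa [pvC3] using hc3
                simp only [pvB_loop, pvB_tier]
                rw [hC1, hc1, if_neg (by simp), hC2, hc2, if_neg (by simp), if_pos h3p]
                by_cases h : 3 < bt <;> simp [h]
              by_cases hb : 3 < bt
              · rw [hL, if_pos hb, ih 3 (some f) (by omega)]
                simp only [pvRef, List.find?_cons, hc1, hc2, hc3, Bool.not_false, Bool.true_and,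
                  Bool.and_true]
                cases List.find? (pvC1 fl) rest
                · cases List.find? (fun f => !pvC1 fl f && pvC2 fl f) rest <;>
                    simp [show bt ≠ 2 by omega, show bt ≠ 3 by omega]
                · simp
              · have hb23 : bt = 2 ∨ bt = 3 := by omega
                rw [hL, if_neg hb, ih bt best hbt]
                simp only [pvRef, List.find?_cons, hc1, hc2, hc3, Bool.not_false, Bool.true_and,
                  Bool.and_true]
                rcases hb23 with h | h <;> subst h
                · cases List.find? (pvC1 fl) rest <;> simp
                · cases List.find? (pvC1 fl) rest
                  · cases List.find? (fun f => !pvC1 fl f && pvC2 fl f) rest <;> simp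
                  · simp
          | false =>
              have hL : pvB_loop fl qw need (f :: rest) bt best =
                  pvB_loop fl qw need rest bt best := by
                have h3n : ¬ need ≤ PySem.Set.len (PySem.Set.inter qw (PySem.Set.ofList (PySem.Str.split₀ (PySem.Str.lower f)))) := by
                  simpa [pvC3] using hc3
                simp only [pvB_loop, pvB_tier]
                rw [hC1, hc1, if_neg (by simp), hC2, hc2, if_neg (by simp), if_neg h3n]
              rw [hL, ih bt best hbt]
              simp [pvRef, hc1, hc2, hc3]

-- ===== VERDICT (by name: the statement is the Claim_ definition above) =====
theorem match_intake_feature_spec : Claim_equal_match_intake_feature := by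
  intro feature_str intake_features _
  unfold Spec_match_intake_feature match_intake_feature match_intake_feature_alt
  rw [pvB_loop_eq _ _ _ _ 4 none (by omega)]
  dsimp only
  rw [pvA_exact_eq, pvA_sub_eq, pvA_overlap_eq]
  set fl := PySem.Str.lower feature_str with hfl
  set qw := PySem.Set.ofList (PySem.Str.split₀ fl) with hqw
  set need := max 1 (PySem.Int.floordiv (PySem.Set.len qw) 2) with hneed
  unfold pvRef
  cases hc1 : intake_features.find? (pvC1 fl) with
  | some f => simp
  | none =>
      have hall1 : ∀ x ∈ intake_features, pvC1 fl x = false := by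
        simpa [List.find?_eq_none] using hc1
      rw [pvFind?_and_not _ _ _ hall1]
      cases hc2 : intake_features.find? (pvC2 fl) with
      | some f => simp
      | none =>
          have hall2 : ∀ x ∈ intake_features, pvC2 fl x = false := by
            simpa [List.find?_eq_none] using hc2
          have hd3 : (intake_features.find? (fun f => !pvC1 fl f && !pvC2 fl f && pvC3 qw need f))
              = intake_features.find? (pvC3 qw need) := by
            rw [show (fun f => !pvC1 fl f && !pvC2 fl f && pvC3 qw need f)
                = (fun f => !pvC1 fl f && (!pvC2 fl f && pvC3 qw need f)) from funext (fun f => by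
                  cases pvC1 fl f <;> cases pvC2 fl f <;> simp)]
            rw [pvFind?_and_not _ _ _ hall1, pvFind?_and_not _ _ _ hall2]
          rw [hd3]
          cases hc3 : intake_features.find? (pvC3 qw need) with
          | some f => simp
          | none => simp
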